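-- pv_equiv track=rewrite | github.com/ngvgi/algos | froggies.py | solution
-- ===== SOURCE A (Python) =====
-- def check_right(arr, i):
--     if i >= len(arr) - 1:
--         return 0
--     if (arr[i+1] < arr[i]):
--         return 0
--     farthest_right = i
--     while(arr[i+1] >= arr[i]):
--         i += 1
--         if i > len(arr)-1:
--             break
--         farthest_right = i
--         if farthest_right + 1 > len(arr) - 1:
--             return farthest_right
--     return farthest_right
--
-- def check_left(arr, i):
--     if (i == 0):
--         return 0
--     if (arr[i-1] < arr[i]):
--         return i
--     farthest_left = i
--     while(arr[i-1] >= arr[i]):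
--         farthest_left = i-1
--         i = farthest_left
--         if farthest_left - 1 < 0:
--             return farthest_left
--     return farthest_left
--
-- def solution(blocks):
--     max_distance = 0
--     unique_values = set(blocks)
--     if(len(unique_values) == 1):
--         return len(blocks)
--     for i in range(len(blocks)):
--         left_leap = check_left(blocks, i)
--         right_leap = check_right(blocks, i)
--         distance = (right_leap - left_leap) + 1
--         if (distance > max_distance):
--             max_distance = distance
--     return max_distance
-- ===== SOURCE B (Python) =====
-- def solution(blocks):
--     n = len(blocks)
--     if n == 0:
--         return 0
--     # lrun[i]: length of the maximal non-increasing run ending at i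
--     lrun = [1] * n
--     for i in range(1, n):
--         if blocks[i-1] >= blocks[i]:
--             lrun[i] = lrun[i-1] + 1
--     # rrun[i]: length of the maximal non-decreasing run starting at i
--     rrun = [1] * n
--     for i in range(n - 2, -1, -1):
--         if blocks[i+1] >= blocks[i]:
--             rrun[i] = rrun[i+1] + 1
--     # a leap span is counted at positions that can hop right (as in the original)
--     best = 1
--     for i in range(n - 1):
--         if blocks[i+1] >= blocks[i]:
--             best = max(best, lrun[i] + rrun[i] - 1)
--     return best
-- ===== Notes on version B (the rewrite author's own statement) =====
-- stated objective: faster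
-- what changed: Replaces A's per-index left/right while-loop walks (re-scanning each run for every index, quadratic on monotone input) with two O(n) run-length passes (lrun/rrun) and a single max scan over right-open positions.
import Mathlib
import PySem

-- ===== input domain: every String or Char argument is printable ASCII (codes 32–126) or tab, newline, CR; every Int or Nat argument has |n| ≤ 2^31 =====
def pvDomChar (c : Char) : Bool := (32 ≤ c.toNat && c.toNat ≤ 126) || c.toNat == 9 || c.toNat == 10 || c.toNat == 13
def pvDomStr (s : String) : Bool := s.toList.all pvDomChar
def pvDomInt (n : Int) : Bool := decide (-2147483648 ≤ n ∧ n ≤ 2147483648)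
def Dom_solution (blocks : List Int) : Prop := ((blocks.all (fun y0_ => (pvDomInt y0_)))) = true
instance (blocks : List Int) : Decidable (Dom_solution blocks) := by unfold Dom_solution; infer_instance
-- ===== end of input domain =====

-- B replaces A's per-index left/right walks (quadratic) by two linear run-length
-- recurrences; objective: faster (O(n) instead of O(n^2) worst case).

-- ===== PORT A =====
-- List indexing is ported as List.getD _ _ 0: every index A actually reads is in
-- range (the loops return before the cursor can step out), so the default is never
-- the value of a reachable read; indices are Nat because A only produces
-- non-negative ones.  Nat subtraction `arr.length - 1` agrees with Python's
-- `len(arr)-1` in every comparison made (for len = 0 both branches coincide).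

-- the `while arr[i+1] >= arr[i]` loop of check_right, with accumulator farthest_right
def crLoop (arr : List Int) (i fr : Nat) : Nat :=
  if arr.getD (i+1) 0 ≥ arr.getD i 0 then
    -- i += 1
    if i + 1 > arr.length - 1 then fr        -- break → return farthest_right
    else                                     -- farthest_right = i
      if (i + 1) + 1 > arr.length - 1 then i + 1   -- return farthest_right
      else crLoop arr (i+1) (i+1)
  else fr
termination_by arr.length - i
decreasing_by omega

def check_right (arr : List Int) (i : Nat) : Nat :=
  if i ≥ arr.length - 1 then 0
  else if arr.getD (i+1) 0 < arr.getD i 0 then 0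
  else crLoop arr i i

-- the `while arr[i-1] >= arr[i]` loop of check_left, with accumulator farthest_left
def clLoop (arr : List Int) (i fl : Nat) : Nat :=
  if arr.getD (i-1) 0 ≥ arr.getD i 0 then
    -- farthest_left = i-1; i = farthest_left
    if i - 1 = 0 then i - 1                  -- farthest_left - 1 < 0 → return
    else clLoop arr (i-1) (i-1)
  else fl
termination_by i
decreasing_by omega

def check_left (arr : List Int) (i : Nat) : Nat :=
  if i = 0 then 0
  else if arr.getD (i-1) 0 < arr.getD i 0 then i
  else clLoop arr i i

def solution (blocks : List Int) : Int :=
  let unique_values : PySem.Set Int := PySem.Set.ofList blocks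
  if PySem.Set.len unique_values = 1 then (blocks.length : Int)
  else
    (List.range blocks.length).foldl
      (fun max_distance i =>
        let distance : Int :=
          (check_right blocks i : Int) - (check_left blocks i : Int) + 1
        if distance > max_distance then distance else max_distance) 0

-- ===== PORT B =====
-- Source B's arrays lrun / rrun are filled by `lrun[i] = lrun[i-1] + 1` /
-- `rrun[i] = rrun[i+1] + 1` passes; their entries are ported as the same
-- recurrences, lrunN blocks i = lrun[i] and rrunN blocks i = rrun[i].

def lrunN (blocks : List Int) : Nat → Nat
  | 0 => 1
  | i+1 => if blocks.getD i 0 ≥ blocks.getD (i+1) 0 then lrunN blocks i + 1 else 1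

def rrunN (blocks : List Int) (i : Nat) : Nat :=
  if i + 1 < blocks.length then
    if blocks.getD (i+1) 0 ≥ blocks.getD i 0 then rrunN blocks (i+1) + 1 else 1
  else 1
termination_by blocks.length - i
decreasing_by omega

def solution_alt (blocks : List Int) : Int :=
  if blocks.length = 0 then 0
  else
    ((List.range (blocks.length - 1)).foldl
      (fun best i =>
        if blocks.getD (i+1) 0 ≥ blocks.getD i 0
        then max best (lrunN blocks i + rrunN blocks i - 1)
        else best) 1 : Nat)

-- ===== PRECONDITION & SPEC =====
def Spec_solution (blocks : List Int) (out : Int) : Prop := out = solution_alt blocks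
instance (blocks : List Int) (out : Int) : Decidable (Spec_solution blocks out) := by unfold Spec_solution; infer_instance

-- ===== CLAIM (what is proved, stated in full; the proofs are below) =====
def Claim_equal_solution : Prop := ∀ (blocks : List Int), Dom_solution blocks → Spec_solution blocks (solution blocks)

-- ===== LEMMAS AND PROOFS =====

theorem lrunN_le (blocks : List Int) : ∀ i, lrunN blocks i ≤ i + 1 := by
  intro i
  induction i with
  | zero => simp [lrunN]
  | succ j ih => rw [lrunN]; split <;> omega

theorem lrunN_pos (blocks : List Int) (i : Nat) : 1 ≤ lrunN blocks i := by
  cases i with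
  | zero => simp [lrunN]
  | succ j => rw [lrunN]; split <;> omega

theorem rrunN_pos (blocks : List Int) (i : Nat) : 1 ≤ rrunN blocks i := by
  rw [rrunN]; split <;> [skip; omega]; split <;> omega

theorem rrunN_last (blocks : List Int) (i : Nat) (h : ¬ i + 1 < blocks.length) :
    rrunN blocks i = 1 := by
  rw [rrunN, if_neg h]

-- the right walk lands on the right end of the non-decreasing run starting at i
theorem rrunN_step (blocks : List Int) (i : Nat)
    (h1 : i + 1 < blocks.length)
    (h2 : blocks.getD (i+1) 0 ≥ blocks.getD i 0) :
    rrunN blocks i = rrunN blocks (i+1) + 1 := by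
  rw [rrunN]; rw [if_pos h1, if_pos h2]

theorem crLoop_eq (blocks : List Int) (i fr : Nat)
    (h1 : i + 1 < blocks.length)
    (h2 : blocks.getD (i+1) 0 ≥ blocks.getD i 0) :
    crLoop blocks i fr = i + rrunN blocks i - 1 := by
  have hr := rrunN_step blocks i h1 h2
  rw [crLoop, if_pos h2, if_neg (by omega : ¬ i + 1 > blocks.length - 1)]
  by_cases h3 : (i + 1) + 1 > blocks.length - 1
  · rw [if_pos h3]
    have : rrunN blocks (i+1) = 1 :=
      rrunN_last blocks (i+1) (by omega)
    omega
  · rw [if_neg h3]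
    have h4' : (i + 1) + 1 < blocks.length := by omega
    by_cases h4 : blocks.getD ((i+1)+1) 0 ≥ blocks.getD (i+1) 0
    · rw [crLoop_eq blocks (i+1) (i+1) h4' h4]
      have := rrunN_pos blocks (i+1)
      omega
    · rw [crLoop, if_neg h4]
      have : rrunN blocks (i+1) = 1 := by
        rw [rrunN]; rw [if_pos h4', if_neg h4]
      omega
termination_by blocks.length - i
decreasing_by omega

theorem check_right_eq (blocks : List Int) (i : Nat) :
    check_right blocks i =
      if i + 1 < blocks.length ∧ blocks.getD (i+1) 0 ≥ blocks.getD i 0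
      then i + rrunN blocks i - 1 else 0 := by
  rw [check_right]
  by_cases h1 : i + 1 < blocks.length
  · rw [if_neg (by omega : ¬ i ≥ blocks.length - 1)]
    by_cases h2 : blocks.getD (i+1) 0 ≥ blocks.getD i 0
    · rw [if_neg (by omega : ¬ blocks.getD (i+1) 0 < blocks.getD i 0),
        crLoop_eq blocks i i h1 h2, if_pos ⟨h1, h2⟩]
    · rw [if_pos (by omega : blocks.getD (i+1) 0 < blocks.getD i 0),
        if_neg (by tauto)]
  · rw [if_pos (by omega : i ≥ blocks.length - 1), if_neg (by tauto)]

-- the left walk lands on the left end of the non-increasing run ending at i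
theorem clLoop_eq (blocks : List Int) : ∀ (i fl : Nat),
    blocks.getD i 0 ≥ blocks.getD (i+1) 0 →
    clLoop blocks (i+1) fl = (i+1) + 1 - lrunN blocks (i+1) := by
  intro i
  induction i with
  | zero =>
    intro fl h
    rw [clLoop, if_pos (by simpa using h), if_pos (by omega : (0 + 1) - 1 = 0)]
    have h2 : lrunN blocks (0+1) =
        if blocks.getD 0 0 ≥ blocks.getD (0+1) 0 then lrunN blocks 0 + 1 else 1 := rfl
    rw [if_pos h] at h2
    have h3 : lrunN blocks 0 = 1 := rfl
    rw [h3] at h2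
    omega
  | succ j ih =>
    intro fl h
    rw [clLoop, if_pos (by simpa using h),
      if_neg (by omega : ¬ (j + 1 + 1) - 1 = 0)]
    have hstep : (j + 1 + 1) - 1 = j + 1 := by omega
    rw [hstep]
    have hsucc : lrunN blocks (j+1+1) = lrunN blocks (j+1) + 1 := by
      rw [lrunN, if_pos h]
    by_cases g : blocks.getD j 0 ≥ blocks.getD (j+1) 0
    · rw [ih (j+1) g]
      have h1 := lrunN_le blocks (j+1)
      omega
    · rw [clLoop, if_neg (by simpa using g)]
      have h1 : lrunN blocks (j+1) = 1 := by rw [lrunN, if_neg g]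
      omega

theorem check_left_eq (blocks : List Int) (i : Nat) :
    check_left blocks i = i + 1 - lrunN blocks i := by
  cases i with
  | zero => simp [check_left, lrunN]
  | succ j =>
    rw [check_left, if_neg (by omega : ¬ j + 1 = 0)]
    by_cases h : blocks.getD (j+1-1) 0 < blocks.getD (j+1) 0
    · rw [if_pos h]
      have hj : ¬ blocks.getD j 0 ≥ blocks.getD (j+1) 0 := by simpa using h
      have h1 : lrunN blocks (j+1) = 1 := by rw [lrunN, if_neg hj]
      omega
    · rw [if_neg h, clLoop_eq blocks j _ (by simpa using h)]

-- the Nat-valued B fold never drops below its start value 1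
theorem bfold_ge_one (blocks : List Int) : ∀ (l : List Nat) (init : Nat),
    init ≤ l.foldl
      (fun best i =>
        if blocks.getD (i+1) 0 ≥ blocks.getD i 0
        then max best (lrunN blocks i + rrunN blocks i - 1)
        else best) init := by
  intro l
  induction l with
  | nil => simp
  | cons x t ih =>
    intro init
    refine le_trans ?_ (ih _)
    dsimp only
    split
    · exact le_max_left _ _
    · exact le_refl _

-- A's distance at index i, expressed through the run lengths
theorem distance_eq (blocks : List Int) (i : Nat) :
    (check_right blocks i : Int) - (check_left blocks i : Int) + 1 =
      if i + 1 < blocks.length ∧ blocks.getD (i+1) 0 ≥ blocks.getD i 0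
      then ((lrunN blocks i + rrunN blocks i - 1 : Nat) : Int)
      else (lrunN blocks i : Int) - i := by
  rw [check_right_eq, check_left_eq]
  have h1 := lrunN_le blocks i
  have h2 := rrunN_pos blocks i
  have h3 := lrunN_pos blocks i
  split
  · push_cast [Nat.cast_sub (by omega : 1 ≤ i + rrunN blocks i),
      Nat.cast_sub (by omega : lrunN blocks i ≤ i + 1),
      Nat.cast_sub (by omega : 1 ≤ lrunN blocks i + rrunN blocks i)]
    ring
  · push_cast [Nat.cast_sub (by omega : lrunN blocks i ≤ i + 1)]
    ring

-- the two folds agree while the index stays below length - 1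
theorem fold_eq (blocks : List Int) : ∀ (k : Nat), 1 ≤ k → k ≤ blocks.length - 1 →
    (List.range k).foldl
      (fun max_distance i =>
        let distance : Int :=
          (check_right blocks i : Int) - (check_left blocks i : Int) + 1
        if distance > max_distance then distance else max_distance) 0 =
    (((List.range k).foldl
      (fun best i =>
        if blocks.getD (i+1) 0 ≥ blocks.getD i 0
        then max best (lrunN blocks i + rrunN blocks i - 1)
        else best) 1 : Nat) : Int) := by
  intro k
  induction k with
  | zero => intro h1 _; omega
  | succ k ih =>
    intro _ hk
    rw [List.range_succ, List.foldl_append, List.foldl_append]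
    dsimp only [List.foldl_cons, List.foldl_nil]
    have hk1 : k + 1 < blocks.length := by omega
    rcases Nat.eq_zero_or_pos k with h0 | hpos
    · subst h0
      dsimp only [List.range_zero, List.foldl_nil]
      rw [distance_eq blocks 0]
      have hl : lrunN blocks 0 = 1 := rfl
      by_cases g : blocks.getD (0+1) 0 ≥ blocks.getD 0 0
      · have hc : 0 + 1 < blocks.length ∧ blocks.getD (0+1) 0 ≥ blocks.getD 0 0 := ⟨hk1, g⟩
        rw [if_pos hc, if_pos g]
        have h2 := rrunN_pos blocks 0
        have hs : 1 ≤ lrunN blocks 0 + rrunN blocks 0 - 1 := by omega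
        rw [if_pos (by exact_mod_cast hs :
          ((lrunN blocks 0 + rrunN blocks 0 - 1 : Nat) : Int) > 0)]
        rw [Nat.max_eq_right hs]
      · have hc : ¬ (0 + 1 < blocks.length ∧ blocks.getD (0+1) 0 ≥ blocks.getD 0 0) :=
          fun hc => g hc.2
        rw [if_neg hc, if_neg g, hl]
        norm_num
    · have ihe := ih hpos (by omega)
      rw [ihe, distance_eq blocks k]
      have hb1 := bfold_ge_one blocks (List.range k) 1
      have hle := lrunN_le blocks k
      by_cases g : blocks.getD (k+1) 0 ≥ blocks.getD k 0
      · have hc : k + 1 < blocks.length ∧ blocks.getD (k+1) 0 ≥ blocks.getD k 0 := ⟨hk1, g⟩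
        rw [if_pos hc, if_pos g]
        rcases Nat.le_total (lrunN blocks k + rrunN blocks k - 1)
            ((List.range k).foldl (fun best i =>
              if blocks.getD (i+1) 0 ≥ blocks.getD i 0
              then max best (lrunN blocks i + rrunN blocks i - 1)
              else best) 1) with hcmp | hcmp
        · rw [if_neg (by exact_mod_cast not_lt.mpr hcmp), Nat.max_eq_left hcmp]
        · rw [Nat.max_eq_right hcmp]
          rcases Nat.eq_or_lt_of_le hcmp with he | hlt
          · rw [he]
            split <;> rfl
          · rw [if_pos (by exact_mod_cast hlt)]
      · have hc : ¬ (k + 1 < blocks.length ∧ blocks.getD (k+1) 0 ≥ blocks.getD k 0) :=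
          fun hc => g hc.2
        rw [if_neg hc, if_neg g]
        rw [if_neg (by omega :
          ¬ ((lrunN blocks k : Int) - (k : Int) >
            ((List.range k).foldl (fun best i =>
              if blocks.getD (i+1) 0 ≥ blocks.getD i 0
              then max best (lrunN blocks i + rrunN blocks i - 1)
              else best) 1 : Nat)))]

-- under an all-equal list, B returns the length
theorem alt_all_equal (blocks : List Int) (c : Int)
    (hne : blocks ≠ []) (heq : ∀ x ∈ blocks, x = c) :
    solution_alt blocks = (blocks.length : Int) := by
  have hn : 1 ≤ blocks.length := by
    cases blocks with
    | nil => exact absurd rfl hne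
    | cons b t => simp
  have hgd : ∀ j, j < blocks.length → blocks.getD j 0 = c := by
    intro j hj
    rw [List.getD_eq_getElem blocks 0 hj]
    exact heq _ (List.getElem_mem hj)
  have hlr : ∀ i, i < blocks.length → lrunN blocks i = i + 1 := by
    intro i
    induction i with
    | zero => intro _; rfl
    | succ j ihj =>
      intro hj
      have hg : blocks.getD j 0 ≥ blocks.getD (j+1) 0 := by
        rw [hgd j (by omega), hgd (j+1) hj]
      have : lrunN blocks (j+1) = lrunN blocks j + 1 := by rw [lrunN, if_pos hg]
      rw [this, ihj (by omega)]
  have hrr : ∀ m i, i + m + 1 = blocks.length → rrunN blocks i = m + 1 := by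
    intro m
    induction m with
    | zero =>
      intro i hi
      exact rrunN_last blocks i (by omega)
    | succ m ihm =>
      intro i hi
      have hg : blocks.getD (i+1) 0 ≥ blocks.getD i 0 := by
        rw [hgd i (by omega), hgd (i+1) (by omega)]
      rw [rrunN_step blocks i (by omega) hg, ihm (i+1) (by omega)]
  have hbf : ∀ k, k ≤ blocks.length - 1 →
      (List.range k).foldl
        (fun best i =>
          if blocks.getD (i+1) 0 ≥ blocks.getD i 0
          then max best (lrunN blocks i + rrunN blocks i - 1)
          else best) 1 = if k = 0 then 1 else blocks.length := by
    intro k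
    induction k with
    | zero => intro _; simp
    | succ k ihk =>
      intro hkk
      rw [List.range_succ, List.foldl_append]
      dsimp only [List.foldl_cons, List.foldl_nil]
      have hg : blocks.getD (k+1) 0 ≥ blocks.getD k 0 := by
        rw [hgd k (by omega), hgd (k+1) (by omega)]
      rw [if_pos hg, ihk (by omega), hlr k (by omega),
        hrr (blocks.length - 1 - k) k (by omega)]
      have hs : k + 1 + (blocks.length - 1 - k + 1) - 1 = blocks.length := by omega
      rw [hs, if_neg (by omega : ¬ k + 1 = 0)]
      rcases Nat.eq_zero_or_pos k with rfl | hk0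
      · rw [if_pos rfl, Nat.max_eq_right hn]
      · rw [if_neg (by omega : ¬ k = 0), Nat.max_self]
  rw [solution_alt, if_neg (by omega : ¬ blocks.length = 0)]
  rw [hbf (blocks.length - 1) le_rfl]
  split_ifs with h0 <;> [omega; rfl]

theorem set_len_one (blocks : List Int)
    (h : PySem.Set.len (PySem.Set.ofList blocks) = 1) :
    blocks ≠ [] ∧ ∀ x ∈ blocks, x = blocks.getD 0 0 := by
  have hlen : (PySem.Set.ofList blocks : List Int).length = 1 := by
    have he : PySem.Set.len (PySem.Set.ofList blocks) =
        ((PySem.Set.ofList blocks : List Int).length : Int) := rfl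
    rw [he] at h
    exact_mod_cast h
  obtain ⟨a, ha⟩ := List.length_eq_one_iff.mp hlen
  have hmem : ∀ x ∈ blocks, x = a := by
    intro x hx
    have : x ∈ (PySem.Set.ofList blocks : List Int) :=
      (PySem.Set.mem_ofList blocks x).mpr hx
    rw [ha] at this
    simpa using this
  cases blocks with
  | nil => simp [PySem.Set.ofList, PySem.Set.empty] at ha
  | cons b t =>
    refine ⟨by simp, ?_⟩
    intro x hx
    rw [hmem x hx, List.getD_cons_zero, hmem b (by simp)]

-- ===== VERDICT (by name: the statement is the Claim_ definition above) =====
theorem solution_spec : Claim_equal_solution := by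
  intro blocks _
  unfold Spec_solution solution
  dsimp only
  by_cases hu : PySem.Set.len (PySem.Set.ofList blocks) = 1
  · obtain ⟨hne, hall⟩ := set_len_one blocks hu
    rw [if_pos hu, alt_all_equal blocks (blocks.getD 0 0) hne hall]
  · rw [if_neg hu]
    rcases Nat.lt_or_ge blocks.length 1 with h1 | h1
    · have hnil : blocks = [] := List.length_eq_zero_iff.mp (by omega)
      subst hnil
      rfl
    · rcases Nat.lt_or_ge blocks.length 2 with h2 | h2
      · -- length = 1
        obtain ⟨b, rfl⟩ := List.length_eq_one_iff.mp (by omega : blocks.length = 1)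
        simp [solution_alt, check_right, check_left]
      · -- length ≥ 2
        have hsplit : List.range blocks.length =
            List.range (blocks.length - 1) ++ [blocks.length - 1] := by
          rw [← List.range_succ]
          congr 1
          omega
        rw [hsplit, List.foldl_append]
        dsimp only [List.foldl_cons, List.foldl_nil]
        rw [fold_eq blocks (blocks.length - 1) (by omega) le_rfl]
        rw [distance_eq blocks (blocks.length - 1),
          if_neg (by omega : ¬ (blocks.length - 1 + 1 < blocks.length ∧
            blocks.getD (blocks.length - 1 + 1) 0 ≥ blocks.getD (blocks.length - 1) 0))]
        have hb1 := bfold_ge_one blocks (List.range (blocks.length - 1)) 1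
        have hle := lrunN_le blocks (blocks.length - 1)
        rw [solution_alt, if_neg (by omega : ¬ blocks.length = 0)]
        rw [if_neg (by omega :
          ¬ ((lrunN blocks (blocks.length - 1) : Int) - ((blocks.length - 1 : Nat) : Int) >
            ((List.range (blocks.length - 1)).foldl (fun best i =>
              if blocks.getD (i+1) 0 ≥ blocks.getD i 0
              then max best (lrunN blocks i + rrunN blocks i - 1)
              else best) 1 : Nat)))]
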